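-- pv_equiv track=rewrite | github.com/Otofuji/coding-interviews | recursive_algorithms/solution.py | all_strictly_increasing_sequences
-- ===== SOURCE A (Python) =====
-- def all_strictly_increasing_sequences(k: int, n: int, **kwargs) -> list[list[int]]:
--     if k == 0:
--         return [[]]
--     if n == 0:
--         return []
--     if k == 1:
--         return [[i] for i in range(1, n+1)]
--     sequences = []
--     for i in range(1, n+1):
--         sub_sequences = all_strictly_increasing_sequences(k-1, i-1)
--         for sub_seq in sub_sequences:
--             sequences.append(sub_seq + [i])
--     return sequences
-- ===== SOURCE B (Python) =====
-- def all_strictly_increasing_sequences(k: int, n: int, **kwargs) -> list[list[int]]: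
--     # Levelwise bottom-up DP: level holds all strictly increasing j-sequences from
--     # 1..n (in A's order) after j rounds.  Because that order sorts by last element,
--     # the sequences extendable by m form a prefix of the level, so each new level is
--     # built in one forward pass with an inner break; no recursion.
--     if k < 0:
--         return []
--     level = [[]]
--     for _ in range(k):
--         if not level:
--             break
--         nxt = []
--         for m in range(1, n + 1):
--             for s in level:
--                 if s and s[-1] >= m:
--                     break
--                 nxt.append(s + [m])
--         level = nxt
--     return level
-- ===== Notes on version B (the rewrite author's own statement) =====
-- stated objective: alternative
-- what changed: Replaced A's recursion on the sequence's last element by an iterative levelwise dynamic program: starting from [[]], each of k rounds builds all (j+1)-sequences from the colex-ordered j-level in one forward pass over 1..n, exploiting that the sequences extendable by m form a prefix of the level (inner break), with an early exit once a level is empty; same output in the same order, including k<=0 and n<=0 corners.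
import Mathlib
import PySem

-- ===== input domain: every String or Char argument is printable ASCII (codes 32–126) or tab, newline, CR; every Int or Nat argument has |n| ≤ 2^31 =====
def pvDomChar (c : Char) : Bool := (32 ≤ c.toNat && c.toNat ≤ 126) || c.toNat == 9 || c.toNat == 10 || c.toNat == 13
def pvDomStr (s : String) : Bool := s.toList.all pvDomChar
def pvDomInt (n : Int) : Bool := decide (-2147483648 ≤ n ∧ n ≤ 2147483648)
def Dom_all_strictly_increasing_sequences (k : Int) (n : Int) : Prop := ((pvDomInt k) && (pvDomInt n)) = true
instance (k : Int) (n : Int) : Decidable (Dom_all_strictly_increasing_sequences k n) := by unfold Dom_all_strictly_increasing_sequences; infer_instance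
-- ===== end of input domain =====

-- B replaces A's recursion on the last element by an iterative levelwise DP: each
-- round extends the colex-ordered level j to level j+1 in one forward pass, using the
-- fact that the sequences extendable by m form a prefix of the level; same output, same order.


-- ===== PORT A =====
def all_strictly_increasing_sequences (k : Int) (n : Int) : List (List Int) :=
  if k = 0 then [[]]
  else if n = 0 then []
  else if k = 1 then (PySem.List.pyRange 1 (n + 1) 1).map (fun i => [i])
  else
    (PySem.List.pyRange 1 (n + 1) 1).attach.foldl
      (fun seqs i =>
        seqs ++ (all_strictly_increasing_sequences (k - 1) (i.val - 1)).map
          (fun sub_seq => sub_seq ++ [i.val]))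
      []
termination_by n.toNat
decreasing_by
  have h := PySem.List.mem_pyRange_one.mp i.property
  omega

-- ===== PORT B =====
-- keep-condition of the inner loop: 'if s and s[-1] >= m: break'
def pvAltKeep (m : Int) (s : List Int) : Bool :=
  !(!s.isEmpty && decide (m ≤ PySem.List.pyGetD s (-1) 0))

-- one round: 'for m in range(1, n+1): for s in level: … break … nxt.append(s + [m])'
def pvAltLevel (n : Int) (level : List (List Int)) : List (List Int) :=
  (PySem.List.pyRange 1 (n + 1) 1).flatMap
    (fun m => (level.takeWhile (pvAltKeep m)).map (fun s => s ++ [m]))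

-- 'for _ in range(k): if not level: break; level = …'
def pvAltGo (n : Int) : Nat → List (List Int) → List (List Int)
  | 0, level => level
  | c + 1, level => if level.isEmpty then level else pvAltGo n c (pvAltLevel n level)

def all_strictly_increasing_sequences_alt (k : Int) (n : Int) : List (List Int) :=
  if k < 0 then [] else pvAltGo n k.toNat [[]]

-- ===== PRECONDITION & SPEC =====
def Spec_all_strictly_increasing_sequences (k : Int) (n : Int) (out : List (List Int)) : Prop := out = all_strictly_increasing_sequences_alt k n
instance (k : Int) (n : Int) (out : List (List Int)) : Decidable (Spec_all_strictly_increasing_sequences k n out) := by unfold Spec_all_strictly_increasing_sequences; infer_instance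

-- ===== CLAIM (what is proved, stated in full; the proofs are below) =====
def Claim_equal_all_strictly_increasing_sequences : Prop := ∀ (k : Int) (n : Int), Dom_all_strictly_increasing_sequences k n → Spec_all_strictly_increasing_sequences k n (all_strictly_increasing_sequences k n)

-- ===== LEMMAS AND PROOFS =====

-- A on an empty range of values: no sequences (unless k = 0).
theorem pvA_nonpos (k n : Int) (hk : k ≠ 0) (hn : n ≤ 0) :
    all_strictly_increasing_sequences k n = [] := by
  rw [all_strictly_increasing_sequences]
  rcases eq_or_lt_of_le hn with h0 | hlt
  · subst h0; simp [hk]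
  · have hr : PySem.List.pyRange 1 (n + 1) 1 = [] :=
      PySem.List.pyRange_one_eq_nil (by omega)
    simp [hk, hr]

-- A with negative k: no sequences.
theorem pvA_neg_k_aux :
    ∀ N : Nat, ∀ k : Int, k < 0 → ∀ n : Int, n.toNat ≤ N →
      all_strictly_increasing_sequences k n = [] := by
  intro N
  induction N with
  | zero =>
    intro k hk n hn
    exact pvA_nonpos k n (by omega) (by omega)
  | succ N ih =>
    intro k hk n hn
    by_cases hn0 : n ≤ 0
    · exact pvA_nonpos k n (by omega) hn0
    · push Not at hn0
      rw [all_strictly_increasing_sequences]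
      rw [if_neg (show ¬ k = 0 by omega), if_neg (show ¬ n = 0 by omega),
        if_neg (show ¬ k = 1 by omega)]
      have hz : ∀ (acc : List (List Int)) (x : {i // i ∈ PySem.List.pyRange 1 (n + 1) 1}),
          x ∈ (PySem.List.pyRange 1 (n + 1) 1).attach →
          (fun seqs (i : {i // i ∈ PySem.List.pyRange 1 (n + 1) 1}) =>
            seqs ++ (all_strictly_increasing_sequences (k - 1) (i.val - 1)).map
              (fun sub_seq => sub_seq ++ [i.val])) acc x = (fun acc _ => acc) acc x := by
        intro acc x _
        have hx := PySem.List.mem_pyRange_one.mp x.property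
        have hsub : all_strictly_increasing_sequences (k - 1) (x.val - 1) = [] :=
          ih (k - 1) (by omega) (x.val - 1) (by omega)
        simp [hsub]
      rw [PySem.List.foldl_congr_mem _ _ (fun acc _ => acc) _ hz]
      induction (PySem.List.pyRange 1 (n + 1) 1).attach with
      | nil => rfl
      | cons y ys ihl => simp [ihl]

theorem pvA_neg_k (k n : Int) (hk : k < 0) :
    all_strictly_increasing_sequences k n = [] :=
  pvA_neg_k_aux n.toNat k hk n le_rfl

-- A's loop, written as a flatMap over the last element (k ≥ 2).
theorem pvA_flatMap (k n : Int) (hk : 2 ≤ k) :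
    all_strictly_increasing_sequences k n =
      (PySem.List.pyRange 1 (n + 1) 1).flatMap
        (fun i => (all_strictly_increasing_sequences (k - 1) (i - 1)).map
          (fun s => s ++ [i])) := by
  rw [all_strictly_increasing_sequences]
  by_cases hn : n = 0
  · subst hn
    rw [if_neg (show ¬ k = 0 by omega), if_pos rfl]
    have h0 : PySem.List.pyRange 1 ((0 : Int) + 1) 1 = [] :=
      PySem.List.pyRange_one_eq_nil (by norm_num)
    rw [h0]
    rfl
  · rw [if_neg (show ¬ k = 0 by omega), if_neg hn, if_neg (show ¬ k = 1 by omega),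
      List.foldl_attach (f := fun seqs i =>
        seqs ++ (all_strictly_increasing_sequences (k - 1) (i - 1)).map
          (fun sub_seq => sub_seq ++ [i]))]
    simpa using PySem.List.foldl_append_eq_flatMap
      (fun i => (all_strictly_increasing_sequences (k - 1) (i - 1)).map (fun s => s ++ [i]))
      (PySem.List.pyRange 1 (n + 1) 1) []

-- A at k = 0: the single empty sequence.
theorem pvA_zero_k (m : Int) : all_strictly_increasing_sequences 0 m = [[]] := by
  rw [all_strictly_increasing_sequences]
  rfl

-- A's loop as a flatMap over the last element, now for every k ≥ 1.
theorem pvA_flatMap' (j n : Int) (hj : 1 ≤ j) :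
    all_strictly_increasing_sequences j n =
      (PySem.List.pyRange 1 (n + 1) 1).flatMap
        (fun i => (all_strictly_increasing_sequences (j - 1) (i - 1)).map
          (fun s => s ++ [i])) := by
  rcases (show j = 1 ∨ 2 ≤ j by omega) with rfl | hj2
  · rw [all_strictly_increasing_sequences]
    by_cases hn : n = 0
    · subst hn
      rw [if_neg (by norm_num), if_pos rfl]
      have h0 : PySem.List.pyRange 1 ((0 : Int) + 1) 1 = [] :=
        PySem.List.pyRange_one_eq_nil (by norm_num)
      rw [h0]
      rfl
    · rw [if_neg (by norm_num), if_neg hn, if_pos rfl]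
      have hc : ∀ i ∈ PySem.List.pyRange 1 (n + 1) 1,
          (all_strictly_increasing_sequences (1 - 1) (i - 1)).map (fun s => s ++ [i]) =
            (fun i => [[i]]) i := by
        intro i _
        rw [show (1 : Int) - 1 = 0 by norm_num, pvA_zero_k]
        rfl
      rw [List.flatMap_congr hc]
      exact List.map_eq_flatMap
  · exact pvA_flatMap j n hj2

-- splitting A's flatMap at a value m
theorem pvA_split (j n m : Int) (hj : 1 ≤ j) (h1 : 1 ≤ m) (h2 : m ≤ n + 1) :
    all_strictly_increasing_sequences j n =
      all_strictly_increasing_sequences j (m - 1) ++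
        (PySem.List.pyRange m (n + 1) 1).flatMap
          (fun i => (all_strictly_increasing_sequences (j - 1) (i - 1)).map
            (fun s => s ++ [i])) := by
  have hs := pvA_flatMap' j (m - 1) hj
  rw [show m - 1 + 1 = m by ring] at hs
  rw [pvA_flatMap' j n hj, PySem.List.pyRange_one_append 1 m (n + 1) h1 h2,
    List.flatMap_append, hs]

-- every sequence A produces (k ≥ 1) is nonempty and ends at a value ≤ n
theorem pvA_mem (j t : Int) (hj : 1 ≤ j) (s : List Int)
    (hs : s ∈ all_strictly_increasing_sequences j t) :
    s ≠ [] ∧ PySem.List.pyGetD s (-1) 0 ≤ t := by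
  rw [pvA_flatMap' j t hj] at hs
  rw [List.mem_flatMap] at hs
  obtain ⟨i, hi, hsm⟩ := hs
  rw [List.mem_map] at hsm
  obtain ⟨s', _, rfl⟩ := hsm
  have hr := PySem.List.mem_pyRange_one.mp hi
  refine ⟨by simp, ?_⟩
  rw [PySem.List.pyGetD_neg_one_append_singleton]
  omega

theorem pvTakeWhileNil {α : Type} (p : α → Bool) (l : List α)
    (h : ∀ x ∈ l, ¬ p x = true) : l.takeWhile p = [] := by
  cases l with
  | nil => rfl
  | cons x xs => rw [List.takeWhile_cons_of_neg (h x List.mem_cons_self)]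

-- the sequences extendable by m form exactly the prefix A j (m-1) of A j n
theorem pvTakeWhile (j n m : Int) (hj0 : 0 ≤ j) (h1 : 1 ≤ m) (h2 : m ≤ n) :
    (all_strictly_increasing_sequences j n).takeWhile (pvAltKeep m) =
      all_strictly_increasing_sequences j (m - 1) := by
  rcases (show j = 0 ∨ 1 ≤ j by omega) with rfl | hj
  · rw [pvA_zero_k, pvA_zero_k]
    rfl
  · rw [pvA_split j n m hj h1 (by omega),
      List.takeWhile_append_of_pos (fun s hs => ?_), pvTakeWhileNil _ _ (fun s hs => ?_),
      List.append_nil]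
    · rw [List.mem_flatMap] at hs
      obtain ⟨i, hi, hsm⟩ := hs
      rw [List.mem_map] at hsm
      obtain ⟨s', _, rfl⟩ := hsm
      have hr := PySem.List.mem_pyRange_one.mp hi
      simp [pvAltKeep, PySem.List.pyGetD_neg_one_append_singleton]
      omega
    · obtain ⟨hne, hle⟩ := pvA_mem j (m - 1) hj s hs
      simp [pvAltKeep, show ¬ m ≤ PySem.List.pyGetD s (-1) 0 by omega]

-- one round of B turns level j into level j+1
theorem pvLevel (j n : Int) (hj : 0 ≤ j) :
    pvAltLevel n (all_strictly_increasing_sequences j n) =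
      all_strictly_increasing_sequences (j + 1) n := by
  have h2 := pvA_flatMap' (j + 1) n (by omega)
  rw [show j + 1 - 1 = j by ring] at h2
  rw [h2]
  unfold pvAltLevel
  refine List.flatMap_congr (fun m hm => ?_)
  have hr := PySem.List.mem_pyRange_one.mp hm
  rw [pvTakeWhile j n m hj (by omega) (by omega)]

theorem pvEmptyMono (j n : Int) (hj : 0 ≤ j)
    (h : all_strictly_increasing_sequences j n = []) :
    ∀ c : Nat, all_strictly_increasing_sequences (j + (c : Int)) n = [] := by
  intro c
  induction c with
  | zero => simpa using h
  | succ c ih =>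
    have hl := pvLevel (j + (c : Int)) n (by positivity)
    rw [ih] at hl
    rw [show j + ((c + 1 : Nat) : Int) = j + (c : Int) + 1 by push_cast; ring, ← hl]
    simp [pvAltLevel]

-- B's outer loop: c rounds from level j reach level j + c
theorem pvGo (n : Int) :
    ∀ (c : Nat) (j : Int), 0 ≤ j →
      pvAltGo n c (all_strictly_increasing_sequences j n) =
        all_strictly_increasing_sequences (j + (c : Int)) n := by
  intro c
  induction c with
  | zero =>
    intro j hj
    simp [pvAltGo]
  | succ c ih =>
    intro j hj
    by_cases he : all_strictly_increasing_sequences j n = []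
    · rw [he]
      simp only [pvAltGo, List.isEmpty_nil, if_true]
      exact (pvEmptyMono j n hj he (c + 1)).symm
    · simp only [pvAltGo]
      rw [if_neg (by simpa using he), pvLevel j n hj, ih (j + 1) (by omega),
        show j + 1 + (c : Int) = j + ((c + 1 : Nat) : Int) by push_cast; ring]

theorem pvMain (k n : Int) :
    all_strictly_increasing_sequences k n = all_strictly_increasing_sequences_alt k n := by
  unfold all_strictly_increasing_sequences_alt
  by_cases hk : k < 0
  · rw [if_pos hk]
    exact pvA_neg_k k n hk
  · rw [if_neg hk, show ([[]] : List (List Int)) = all_strictly_increasing_sequences 0 n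
      from (pvA_zero_k n).symm, pvGo n k.toNat 0 le_rfl, show (0 : Int) + (k.toNat : Int) = k by omega]

-- ===== VERDICT (by name: the statement is the Claim_ definition above) =====
theorem all_strictly_increasing_sequences_spec : Claim_equal_all_strictly_increasing_sequences := by
  intro k n _
  simpa [Spec_all_strictly_increasing_sequences] using pvMain k n
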